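-- pv_equiv track=rewrite | github.com/jorgesmu/algorithm_exercises | matrices/matrix_product.py | max_prod
-- ===== SOURCE A (Python) =====
-- def max_prod(matrix):
-- 	rows = len(matrix)
-- 	cols = len(matrix[0])
--
-- 	max_prod = [[0 for i in range(cols)] for j in range(rows)]
-- 	min_prod = [[0 for i in range(cols)] for j in range(rows)]
-- 	max_prod[0][0] = min_prod[0][0] = matrix[0][0]
--
-- 	for col in range(1, cols):
-- 		max_prod[0][col] = matrix[0][col]*max_prod[0][col-1]
-- 		min_prod[0][col] = matrix[0][col]*min_prod[0][col-1]
--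
-- 	for row in range(1, rows):
-- 		max_prod[row][0] = matrix[row][0]*max_prod[row-1][0]
-- 		min_prod[row][0] = matrix[row][0]*min_prod[row-1][0]
--
-- 	for col in range(1, cols):
-- 		for row in range(1, rows):
-- 			max_prod[row][col] = max(matrix[row][col]*max_prod[row-1][col],
-- 									matrix[row][col]*max_prod[row][col-1],
-- 									matrix[row][col]*min_prod[row-1][col],
-- 									matrix[row][col]*min_prod[row][col-1])
-- 			min_prod[row][col] = min(matrix[row][col]*max_prod[row-1][col],
-- 									matrix[row][col]*max_prod[row][col-1],
-- 									matrix[row][col]*min_prod[row-1][col],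
-- 								 	matrix[row][col]*min_prod[row][col-1])
-- 	return max_prod[rows-1][cols-1]
-- ===== SOURCE B (Python) =====
-- def max_prod(matrix):
--     rows = len(matrix)
--     cols = len(matrix[0])
--     cache = {}
--
--     def best(r, c):
--         if (r, c) in cache:
--             return cache[(r, c)]
--         x = matrix[r][c]
--         if r == 0 and c == 0:
--             res = (x, x)
--         elif r == 0:
--             hi, lo = best(0, c - 1)
--             res = (x * hi, x * lo)
--         elif c == 0:
--             hi, lo = best(r - 1, 0)
--             res = (x * hi, x * lo)
--         else:
--             uh, ul = best(r - 1, c)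
--             lh, ll = best(r, c - 1)
--             res = (max(x * uh, x * ul, x * lh, x * ll),
--                    min(x * uh, x * ul, x * lh, x * ll))
--         cache[(r, c)] = res
--         return res
--
--     return best(rows - 1, cols - 1)[0]
-- ===== Notes on version B (the rewrite author's own statement) =====
-- stated objective: alternative
-- what changed: Replaces A's bottom-up fill of two full rows x cols tables via three separate boundary/interior loops with a top-down memoized recursion best(r,c) returning the (max,min) product pair for each cell, cached in a dict and evaluated on demand from (rows-1,cols-1).
import Mathlib
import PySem

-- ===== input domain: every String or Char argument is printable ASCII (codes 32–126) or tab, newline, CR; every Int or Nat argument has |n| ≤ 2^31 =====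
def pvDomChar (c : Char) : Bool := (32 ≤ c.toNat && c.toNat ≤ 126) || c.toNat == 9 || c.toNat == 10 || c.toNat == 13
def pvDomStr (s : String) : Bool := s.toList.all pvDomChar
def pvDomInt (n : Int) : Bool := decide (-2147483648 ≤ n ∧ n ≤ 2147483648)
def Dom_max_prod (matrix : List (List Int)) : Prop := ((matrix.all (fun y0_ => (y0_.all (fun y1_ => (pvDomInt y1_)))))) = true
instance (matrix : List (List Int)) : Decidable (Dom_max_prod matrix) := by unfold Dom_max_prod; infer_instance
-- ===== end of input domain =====

-- B replaces A's bottom-up fill of two full rows×cols tables by a top-down memoized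
-- recursion best(r,c) caching (max,min) product pairs in a dict (alternative decomposition).

-- ===== PORT A =====
-- t[r][c] read with default (all reads are in range under Pre_)
def pvGet2 (t : List (List Int)) (r c : Nat) : Int := (t.getD r []).getD c 0
-- t[r][c] = v
def pvSet2 (t : List (List Int)) (r c : Nat) (v : Int) : List (List Int) :=
  t.set r ((t.getD r []).set c v)

-- body of A's first loop: for col in range(1, cols)
def pvLoop1 (m : List (List Int)) (s : List (List Int) × List (List Int)) (col : Nat) :
    List (List Int) × List (List Int) :=
  (pvSet2 s.1 0 col (pvGet2 m 0 col * pvGet2 s.1 0 (col - 1)),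
   pvSet2 s.2 0 col (pvGet2 m 0 col * pvGet2 s.2 0 (col - 1)))

-- body of A's second loop: for row in range(1, rows)
def pvLoop2 (m : List (List Int)) (s : List (List Int) × List (List Int)) (row : Nat) :
    List (List Int) × List (List Int) :=
  (pvSet2 s.1 row 0 (pvGet2 m row 0 * pvGet2 s.1 (row - 1) 0),
   pvSet2 s.2 row 0 (pvGet2 m row 0 * pvGet2 s.2 (row - 1) 0))

-- body of A's inner interior loop: for row in range(1, rows) (at fixed col)
def pvLoop3 (m : List (List Int)) (col : Nat) (s : List (List Int) × List (List Int)) (row : Nat) :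
    List (List Int) × List (List Int) :=
  let x := pvGet2 m row col
  let mx := max (max (x * pvGet2 s.1 (row - 1) col) (x * pvGet2 s.1 row (col - 1)))
                (max (x * pvGet2 s.2 (row - 1) col) (x * pvGet2 s.2 row (col - 1)))
  let mn := min (min (x * pvGet2 s.1 (row - 1) col) (x * pvGet2 s.1 row (col - 1)))
                (min (x * pvGet2 s.2 (row - 1) col) (x * pvGet2 s.2 row (col - 1)))
  (pvSet2 s.1 row col mx, pvSet2 s.2 row col mn)

def max_prod (matrix : List (List Int)) : Int :=
  let rows := matrix.length
  let cols := (matrix.getD 0 []).length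
  let mp0 : List (List Int) := List.replicate rows (List.replicate cols 0)
  let np0 : List (List Int) := List.replicate rows (List.replicate cols 0)
  let m00 := pvGet2 matrix 0 0
  let s1 := (pvSet2 mp0 0 0 m00, pvSet2 np0 0 0 m00)
  let s2 := (List.range' 1 (cols - 1)).foldl (pvLoop1 matrix) s1
  let s3 := (List.range' 1 (rows - 1)).foldl (pvLoop2 matrix) s2
  let s4 := (List.range' 1 (cols - 1)).foldl
      (fun s col => (List.range' 1 (rows - 1)).foldl (pvLoop3 matrix col) s) s3
  pvGet2 s4.1 (rows - 1) (cols - 1)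

-- ===== PORT B =====
-- Source B's recursive helper best(r, c): returns its value pair together with the
-- updated cache (Python's mutable dict is threaded through the recursion).
-- '(r, c) in cache' / 'cache[(r, c)]' are ported as contains / getD (the default
-- is never read: contains guarantees the key is present).
def pvBestRec (m : List (List Int)) (r c : Nat)
    (cache : PySem.Dict (Nat × Nat) (Int × Int)) :
    (Int × Int) × PySem.Dict (Nat × Nat) (Int × Int) :=
  if cache.contains (r, c) = true then (cache.getD (r, c) (0, 0), cache)
  else
    let x := pvGet2 m r c
    if r = 0 ∧ c = 0 then
      let res := (x, x)
      (res, cache.insert (r, c) res)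
    else if r = 0 then
      let p := pvBestRec m 0 (c - 1) cache
      let res := (x * p.1.1, x * p.1.2)
      (res, p.2.insert (r, c) res)
    else if c = 0 then
      let p := pvBestRec m (r - 1) 0 cache
      let res := (x * p.1.1, x * p.1.2)
      (res, p.2.insert (r, c) res)
    else
      let u := pvBestRec m (r - 1) c cache
      let l := pvBestRec m r (c - 1) u.2
      let res := (max (max (max (x * u.1.1) (x * u.1.2)) (x * l.1.1)) (x * l.1.2),
                  min (min (min (x * u.1.1) (x * u.1.2)) (x * l.1.1)) (x * l.1.2))
      (res, l.2.insert (r, c) res)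
termination_by r + c
decreasing_by all_goals omega

def max_prod_alt (matrix : List (List Int)) : Int :=
  let rows := matrix.length
  let cols := (matrix.getD 0 []).length
  (pvBestRec matrix (rows - 1) (cols - 1) PySem.Dict.empty).1.1

-- ===== PRECONDITION & SPEC =====
-- Pre_ excludes exactly the inputs where A raises IndexError: the empty matrix, an empty
-- first row, or a later row shorter than the first row (B raises there too).
def Pre_max_prod (matrix : List (List Int)) : Prop :=
  matrix ≠ [] ∧ (matrix.getD 0 []) ≠ [] ∧
    ∀ row ∈ matrix, (matrix.getD 0 []).length ≤ row.length
instance (matrix : List (List Int)) : Decidable (Pre_max_prod matrix) := by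
  unfold Pre_max_prod; infer_instance
def pvWitness_max_prod : List (List Int) := [[2, -3], [4, 5]]

def Spec_max_prod (matrix : List (List Int)) (out : Int) : Prop := out = max_prod_alt matrix
instance (matrix : List (List Int)) (out : Int) : Decidable (Spec_max_prod matrix out) := by unfold Spec_max_prod; infer_instance

-- ===== CLAIM (what is proved, stated in full; the proofs are below) =====
def Claim_equal_max_prod : Prop := ∀ (matrix : List (List Int)), Dom_max_prod matrix → Pre_max_prod matrix → Spec_max_prod matrix (max_prod matrix)

-- ===== LEMMAS AND PROOFS =====

-- the mathematical recurrence: (max-product, min-product) over monotone paths from (0,0) to (r,c)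
def pvBest (m : List (List Int)) : Nat → Nat → Int × Int
  | 0, 0 => (pvGet2 m 0 0, pvGet2 m 0 0)
  | 0, c + 1 =>
      let x := pvGet2 m 0 (c + 1); let p := pvBest m 0 c
      (x * p.1, x * p.2)
  | r + 1, 0 =>
      let x := pvGet2 m (r + 1) 0; let p := pvBest m r 0
      (x * p.1, x * p.2)
  | r + 1, c + 1 =>
      let x := pvGet2 m (r + 1) (c + 1)
      let u := pvBest m r (c + 1)
      let l := pvBest m (r + 1) c
      (max (max (x * u.1) (x * l.1)) (max (x * u.2) (x * l.2)),
       min (min (x * u.1) (x * l.1)) (min (x * u.2) (x * l.2)))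

-- ===== B side =====

-- every cached value is the recurrence value of its cell
def MemoOK (m : List (List Int)) (d : PySem.Dict (Nat × Nat) (Int × Int)) : Prop :=
  ∀ r c v, d.get? (r, c) = some v → v = pvBest m r c

theorem memoOK_insert {m : List (List Int)} {d : PySem.Dict (Nat × Nat) (Int × Int)}
    (hd : MemoOK m d) {r c : Nat} {v : Int × Int} (hv : v = pvBest m r c) :
    MemoOK m (d.insert (r, c) v) := by
  intro r' c' w hw
  rw [PySem.Dict.get?_insert] at hw
  by_cases h : ((r', c') : Nat × Nat) = (r, c)
  · rw [if_pos h] at hw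
    obtain ⟨h1, h2⟩ := Prod.mk.inj h
    subst h1; subst h2
    exact Option.some.inj hw ▸ hv
  · rw [if_neg h] at hw
    exact hd r' c' w hw

theorem pvBestRec_correct (m : List (List Int)) :
    ∀ (n r c : Nat) (d : PySem.Dict (Nat × Nat) (Int × Int)), r + c ≤ n → MemoOK m d →
      (pvBestRec m r c d).1 = pvBest m r c ∧ MemoOK m (pvBestRec m r c d).2 := by
  intro n
  induction n with
  | zero =>
      intro r c d hn hd
      obtain ⟨rfl, rfl⟩ : r = 0 ∧ c = 0 := by omega
      by_cases hmem : d.contains ((0 : Nat), (0 : Nat)) = true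
      · rw [pvBestRec, if_pos hmem]
        obtain ⟨v, hv⟩ : ∃ v, d.get? ((0 : Nat), (0 : Nat)) = some v := by
          cases hv : d.get? ((0 : Nat), (0 : Nat)) with
          | some v => exact ⟨v, rfl⟩
          | none => rw [PySem.Dict.contains_eq_isSome_get?, hv] at hmem; simp at hmem
        have hgd : d.getD ((0 : Nat), (0 : Nat)) (0, 0) = v := by
          rw [PySem.Dict.getD_eq_get?_getD, hv]; rfl
        exact ⟨by rw [show (d.getD ((0 : Nat), (0 : Nat)) (0, 0), d).1 = d.getD ((0 : Nat), (0 : Nat)) (0, 0) from rfl, hgd]; exact hd 0 0 v hv, hd⟩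
      · rw [pvBestRec, if_neg hmem, if_pos (⟨rfl, rfl⟩ : (0 : Nat) = 0 ∧ (0 : Nat) = 0)]
        exact ⟨by simp [pvBest], memoOK_insert hd (by simp [pvBest])⟩
  | succ n ih =>
      intro r c d hn hd
      by_cases hmem : d.contains ((r, c) : Nat × Nat) = true
      · rw [pvBestRec, if_pos hmem]
        obtain ⟨v, hv⟩ : ∃ v, d.get? ((r, c) : Nat × Nat) = some v := by
          cases hv : d.get? ((r, c) : Nat × Nat) with
          | some v => exact ⟨v, rfl⟩
          | none => rw [PySem.Dict.contains_eq_isSome_get?, hv] at hmem; simp at hmem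
        have hgd : d.getD ((r, c) : Nat × Nat) (0, 0) = v := by
          rw [PySem.Dict.getD_eq_get?_getD, hv]; rfl
        exact ⟨by rw [show (d.getD ((r, c) : Nat × Nat) (0, 0), d).1 = d.getD ((r, c) : Nat × Nat) (0, 0) from rfl, hgd]; exact hd r c v hv, hd⟩
      · rw [pvBestRec, if_neg hmem]
        by_cases h00 : r = 0 ∧ c = 0
        · obtain ⟨rfl, rfl⟩ := h00
          rw [if_pos (⟨rfl, rfl⟩ : (0 : Nat) = 0 ∧ (0 : Nat) = 0)]
          exact ⟨by simp [pvBest], memoOK_insert hd (by simp [pvBest])⟩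
        · rw [if_neg h00]
          by_cases hr : r = 0
          · subst hr
            obtain ⟨c', rfl⟩ : ∃ c', c = c' + 1 := ⟨c - 1, by omega⟩
            rw [if_pos rfl]
            obtain ⟨hp1, hp2⟩ := ih 0 (c' + 1 - 1) d (by omega) hd
            refine ⟨?_, memoOK_insert hp2 ?_⟩ <;>
            · show _ = pvBest m 0 (c' + 1)
              simp only [Nat.add_sub_cancel] at hp1 ⊢
              rw [hp1]
              simp [pvBest]
          · rw [if_neg hr]
            by_cases hc : c = 0
            · subst hc
              obtain ⟨r', rfl⟩ : ∃ r', r = r' + 1 := ⟨r - 1, by omega⟩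
              rw [if_pos rfl]
              obtain ⟨hp1, hp2⟩ := ih (r' + 1 - 1) 0 d (by omega) hd
              refine ⟨?_, memoOK_insert hp2 ?_⟩ <;>
              · show _ = pvBest m (r' + 1) 0
                simp only [Nat.add_sub_cancel] at hp1 ⊢
                rw [hp1]
                simp [pvBest]
            · rw [if_neg hc]
              obtain ⟨r', rfl⟩ : ∃ r', r = r' + 1 := ⟨r - 1, by omega⟩
              obtain ⟨c', rfl⟩ : ∃ c', c = c' + 1 := ⟨c - 1, by omega⟩
              obtain ⟨hu1, hu2⟩ := ih (r' + 1 - 1) (c' + 1) d (by omega) hd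
              obtain ⟨hl1, hl2⟩ := ih (r' + 1) (c' + 1 - 1)
                (pvBestRec m (r' + 1 - 1) (c' + 1) d).2 (by omega) hu2
              have hres : ∀ x a b e f : Int,
                  (max (max (max (x * a) (x * b)) (x * e)) (x * f),
                   min (min (min (x * a) (x * b)) (x * e)) (x * f))
                  = (max (max (x * a) (x * e)) (max (x * b) (x * f)),
                     min (min (x * a) (x * e)) (min (x * b) (x * f))) := by
                intro x a b e f
                refine Prod.ext ?_ ?_ <;> simp only [] <;> omega
              refine ⟨?_, memoOK_insert hl2 ?_⟩ <;>
              · show _ = pvBest m (r' + 1) (c' + 1)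
                simp only [Nat.add_sub_cancel] at hu1 hl1 ⊢
                rw [hu1, hl1, hres]
                simp [pvBest]

theorem max_prod_alt_eq_best (m : List (List Int)) :
    max_prod_alt m = (pvBest m (m.length - 1) ((m.getD 0 []).length - 1)).1 := by
  have h := (pvBestRec_correct m (m.length - 1 + ((m.getD 0 []).length - 1))
    (m.length - 1) ((m.getD 0 []).length - 1) PySem.Dict.empty le_rfl
    (fun r c v hv => by simp [PySem.Dict.get?_empty] at hv)).1
  show (pvBestRec m (m.length - 1) ((m.getD 0 []).length - 1) PySem.Dict.empty).1.1 = _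
  rw [h]

-- ===== A side =====

def TShape (rows cols : Nat) (t : List (List Int)) : Prop :=
  t.length = rows ∧ ∀ r < rows, (t.getD r []).length = cols

theorem tshape_replicate (rows cols : Nat) :
    TShape rows cols (List.replicate rows (List.replicate cols (0 : Int))) := by
  refine ⟨by simp, fun r hr => ?_⟩
  rw [List.getD_eq_getElem _ _ (by simpa using hr)]
  simp

theorem tshape_set2 {rows cols : Nat} {t : List (List Int)} (ht : TShape rows cols t)
    (r c : Nat) (v : Int) : TShape rows cols (pvSet2 t r c v) := by
  obtain ⟨hlen, hrow⟩ := ht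
  refine ⟨by simp [pvSet2, hlen], fun r' hr' => ?_⟩
  have hlt : r' < t.length := by omega
  by_cases hrr : r' = r
  · subst hrr
    rw [pvSet2, List.getD_eq_getElem?_getD, List.getElem?_set_self hlt]
    show ((t.getD r' []).set c v).length = cols
    rw [List.length_set]
    exact hrow r' hr'
  · rw [pvSet2, List.getD_eq_getElem?_getD, List.getElem?_set_ne (fun h => hrr h.symm),
      ← List.getD_eq_getElem?_getD]
    exact hrow r' hr'

theorem get2_set2_self {rows cols : Nat} {t : List (List Int)} (ht : TShape rows cols t)
    {r c : Nat} (hr : r < rows) (hc : c < cols) (v : Int) :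
    pvGet2 (pvSet2 t r c v) r c = v := by
  obtain ⟨hlen, hrow⟩ := ht
  have hrt : r < t.length := by omega
  have h1 : (t.set r ((t.getD r []).set c v)).getD r [] = (t.getD r []).set c v := by
    rw [List.getD_eq_getElem?_getD, List.getElem?_set_self hrt]
    rfl
  rw [pvGet2, pvSet2, h1, List.getD_eq_getElem?_getD,
    List.getElem?_set_self (by rw [hrow r hr]; exact hc)]
  rfl

theorem get2_set2_ne {t : List (List Int)} {r c r' c' : Nat} (h : r' ≠ r ∨ c' ≠ c) (v : Int) :
    pvGet2 (pvSet2 t r c v) r' c' = pvGet2 t r' c' := by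
  by_cases hrr : r' = r
  · subst hrr
    have hcc : c' ≠ c := h.resolve_left (fun h => h rfl)
    by_cases hlt : r' < t.length
    · have h1 : (t.set r' ((t.getD r' []).set c v)).getD r' [] = (t.getD r' []).set c v := by
        rw [List.getD_eq_getElem?_getD, List.getElem?_set_self hlt]
        rfl
      have h2 : ((t.getD r' []).set c v).getD c' 0 = (t.getD r' []).getD c' 0 := by
        rw [List.getD_eq_getElem?_getD, List.getElem?_set_ne (fun hh => hcc hh.symm),
          ← List.getD_eq_getElem?_getD]
      rw [pvGet2, pvSet2, h1, h2]
      rfl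
    · rw [pvGet2, pvSet2, List.set_eq_of_length_le (by omega)]
      rfl
  · have h1 : (t.set r ((t.getD r []).set c v)).getD r' [] = t.getD r' [] := by
      rw [List.getD_eq_getElem?_getD, List.getElem?_set_ne (fun hh => hrr hh.symm),
        ← List.getD_eq_getElem?_getD]
    rw [pvGet2, pvSet2, h1]
    rfl

-- cells (r,c) of both tables satisfying P hold the recurrence values
def TabOK (m : List (List Int)) (P : Nat → Nat → Prop)
    (s : List (List Int) × List (List Int)) : Prop :=
  ∀ r c, r < m.length → c < (m.getD 0 []).length → P r c →
    pvGet2 s.1 r c = (pvBest m r c).1 ∧ pvGet2 s.2 r c = (pvBest m r c).2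

def pvInv (m : List (List Int)) (P : Nat → Nat → Prop)
    (s : List (List Int) × List (List Int)) : Prop :=
  TShape m.length (m.getD 0 []).length s.1 ∧ TShape m.length (m.getD 0 []).length s.2 ∧
    TabOK m P s

theorem pvInv_mono {m : List (List Int)} {P Q : Nat → Nat → Prop}
    {s : List (List Int) × List (List Int)}
    (h : ∀ r c, r < m.length → c < (m.getD 0 []).length → Q r c → P r c)
    (hs : pvInv m P s) : pvInv m Q s :=
  ⟨hs.1, hs.2.1, fun r c hr hc hq => hs.2.2 r c hr hc (h r c hr hc hq)⟩

theorem phase1 (m : List (List Int)) (s : List (List Int) × List (List Int))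
    (hrows : 0 < m.length)
    (hs : pvInv m (fun r c => r = 0 ∧ c = 0) s) :
    ∀ n, n ≤ (m.getD 0 []).length - 1 →
      pvInv m (fun r c => r = 0 ∧ c ≤ n) ((List.range' 1 n).foldl (pvLoop1 m) s) := by
  intro n
  induction n with
  | zero =>
      intro _
      rw [List.range'_zero, List.foldl_nil]
      exact pvInv_mono (fun r c _ _ hq => ⟨hq.1, by omega⟩) hs
  | succ n ih =>
      intro hn
      rw [List.range'_concat, List.foldl_append, List.foldl_cons, List.foldl_nil]
      simp only [one_mul]
      rw [Nat.add_comm 1 n]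
      obtain ⟨h1, h2, h3⟩ := ih (by omega)
      have hncols : n < (m.getD 0 []).length := by omega
      have hn1cols : n + 1 < (m.getD 0 []).length := by omega
      have hprev := h3 0 n hrows hncols ⟨rfl, le_rfl⟩
      refine ⟨tshape_set2 h1 _ _ _, tshape_set2 h2 _ _ _, fun r c hr hc hq => ?_⟩
      obtain ⟨hr0, hcn⟩ := hq
      subst hr0
      by_cases hc' : c = n + 1
      · subst hc'
        rw [pvLoop1]
        refine ⟨?_, ?_⟩
        · rw [get2_set2_self h1 hr hc, Nat.add_sub_cancel, hprev.1]
          simp [pvBest]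
        · rw [get2_set2_self h2 hr hc, Nat.add_sub_cancel, hprev.2]
          simp [pvBest]
      · rw [pvLoop1]
        refine ⟨?_, ?_⟩
        · rw [get2_set2_ne (Or.inr hc')]
          exact (h3 0 c hr hc ⟨rfl, by omega⟩).1
        · rw [get2_set2_ne (Or.inr hc')]
          exact (h3 0 c hr hc ⟨rfl, by omega⟩).2

theorem phase2 (m : List (List Int)) (s : List (List Int) × List (List Int))
    (hcols : 0 < (m.getD 0 []).length)
    (hs : pvInv m (fun r _c => r = 0) s) :
    ∀ n, n ≤ m.length - 1 →
      pvInv m (fun r c => r = 0 ∨ (c = 0 ∧ r ≤ n)) ((List.range' 1 n).foldl (pvLoop2 m) s) := by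
  intro n
  induction n with
  | zero =>
      intro _
      rw [List.range'_zero, List.foldl_nil]
      exact pvInv_mono (fun r c _ _ hq => by omega) hs
  | succ n ih =>
      intro hn
      rw [List.range'_concat, List.foldl_append, List.foldl_cons, List.foldl_nil]
      simp only [one_mul]
      rw [Nat.add_comm 1 n]
      obtain ⟨h1, h2, h3⟩ := ih (by omega)
      have hnrows : n < m.length := by omega
      have hn1rows : n + 1 < m.length := by omega
      have hprev := h3 n 0 hnrows hcols (by omega)
      refine ⟨tshape_set2 h1 _ _ _, tshape_set2 h2 _ _ _, fun r c hr hc hq => ?_⟩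
      by_cases hrc : r = n + 1 ∧ c = 0
      · obtain ⟨hr1, hc0⟩ := hrc
        subst hr1; subst hc0
        rw [pvLoop2]
        refine ⟨?_, ?_⟩
        · rw [get2_set2_self h1 hr hc, Nat.add_sub_cancel, hprev.1]
          simp [pvBest]
        · rw [get2_set2_self h2 hr hc, Nat.add_sub_cancel, hprev.2]
          simp [pvBest]
      · have hne : r ≠ n + 1 ∨ c ≠ 0 := by tauto
        rw [pvLoop2]
        have hq' : r = 0 ∨ (c = 0 ∧ r ≤ n) := by omega
        refine ⟨?_, ?_⟩
        · rw [get2_set2_ne hne]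
          exact (h3 r c hr hc hq').1
        · rw [get2_set2_ne hne]
          exact (h3 r c hr hc hq').2

theorem phase3_inner (m : List (List Int)) (C : Nat) (s : List (List Int) × List (List Int))
    (hC : 1 ≤ C) (hCc : C < (m.getD 0 []).length)
    (hs : pvInv m (fun r c => r = 0 ∨ c = 0 ∨ c < C) s) :
    ∀ j, j ≤ m.length - 1 →
      pvInv m (fun r c => r = 0 ∨ c = 0 ∨ c < C ∨ (c = C ∧ r ≤ j))
        ((List.range' 1 j).foldl (pvLoop3 m C) s) := by
  intro j
  induction j with
  | zero =>
      intro _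
      rw [List.range'_zero, List.foldl_nil]
      exact pvInv_mono (fun r c _ _ hq => by omega) hs
  | succ j ih =>
      intro hj
      rw [List.range'_concat, List.foldl_append, List.foldl_cons, List.foldl_nil]
      simp only [one_mul]
      rw [Nat.add_comm 1 j]
      obtain ⟨h1, h2, h3⟩ := ih (by omega)
      have hjrows : j < m.length := by omega
      have hj1rows : j + 1 < m.length := by omega
      have hC1 : C - 1 < (m.getD 0 []).length := by omega
      have hu := h3 j C hjrows hCc (by omega)
      have hl := h3 (j + 1) (C - 1) hj1rows hC1 (by omega)
      obtain ⟨C', rfl⟩ : ∃ C', C = C' + 1 := ⟨C - 1, by omega⟩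
      refine ⟨tshape_set2 h1 _ _ _, tshape_set2 h2 _ _ _, fun r c hr hc hq => ?_⟩
      by_cases hrc : r = j + 1 ∧ c = C' + 1
      · obtain ⟨hr1, hc1⟩ := hrc
        subst hr1; subst hc1
        rw [pvLoop3]
        simp only [Nat.add_sub_cancel] at hu hl ⊢
        refine ⟨?_, ?_⟩
        · rw [get2_set2_self h1 hr hc, hu.1, hu.2, hl.1, hl.2]
          simp [pvBest]
        · rw [get2_set2_self h2 hr hc, hu.1, hu.2, hl.1, hl.2]
          simp [pvBest]
      · have hne : r ≠ j + 1 ∨ c ≠ C' + 1 := by tauto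
        rw [pvLoop3]
        have hq' : r = 0 ∨ c = 0 ∨ c < C' + 1 ∨ (c = C' + 1 ∧ r ≤ j) := by omega
        simp only [Nat.add_sub_cancel]
        refine ⟨?_, ?_⟩
        · rw [get2_set2_ne hne]
          exact (h3 r c hr hc hq').1
        · rw [get2_set2_ne hne]
          exact (h3 r c hr hc hq').2

theorem phase3 (m : List (List Int)) (s : List (List Int) × List (List Int))
    (hs : pvInv m (fun r c => r = 0 ∨ c = 0) s) :
    ∀ n, n ≤ (m.getD 0 []).length - 1 →
      pvInv m (fun r c => r = 0 ∨ c = 0 ∨ c ≤ n)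
        ((List.range' 1 n).foldl
          (fun s col => (List.range' 1 (m.length - 1)).foldl (pvLoop3 m col) s) s) := by
  intro n
  induction n with
  | zero =>
      intro _
      rw [List.range'_zero, List.foldl_nil]
      exact pvInv_mono (fun r c _ _ hq => by omega) hs
  | succ n ih =>
      intro hn
      rw [List.range'_concat, List.foldl_append, List.foldl_cons, List.foldl_nil]
      simp only [one_mul]
      rw [Nat.add_comm 1 n]
      have hI := ih (by omega)
      have hstart := pvInv_mono (P := fun r c => r = 0 ∨ c = 0 ∨ c < n + 1)
        (Q := fun r c => r = 0 ∨ c = 0 ∨ c < n + 1) (fun r c _ _ hq => hq)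
        (pvInv_mono (fun r c _ _ hq => by omega) hI)
      have hinner := phase3_inner m (n + 1) _ (by omega) (by omega) hstart
        (m.length - 1) le_rfl
      exact pvInv_mono (fun r c hr hc hq => by omega) hinner

theorem max_prod_eq_best (m : List (List Int)) (h : Pre_max_prod m) :
    max_prod m = (pvBest m (m.length - 1) ((m.getD 0 []).length - 1)).1 := by
  obtain ⟨hm, hf, _⟩ := h
  have hrows : 0 < m.length := List.length_pos_iff.mpr hm
  have hcols : 0 < (m.getD 0 []).length := List.length_pos_iff.mpr hf
  have h0 : pvInv m (fun r c => r = 0 ∧ c = 0)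
      (pvSet2 (List.replicate m.length (List.replicate (m.getD 0 []).length 0)) 0 0
        (pvGet2 m 0 0),
       pvSet2 (List.replicate m.length (List.replicate (m.getD 0 []).length 0)) 0 0
        (pvGet2 m 0 0)) := by
    refine ⟨tshape_set2 (tshape_replicate _ _) _ _ _,
      tshape_set2 (tshape_replicate _ _) _ _ _, fun r c hr hc hq => ?_⟩
    obtain ⟨hr0, hc0⟩ := hq
    subst hr0; subst hc0
    rw [get2_set2_self (tshape_replicate _ _) hr hc]
    simp [pvBest]
  have hp1 := phase1 m _ hrows h0 ((m.getD 0 []).length - 1) le_rfl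
  have hp2 := phase2 m _ hcols
    (pvInv_mono (fun r c hr hc hq => ⟨hq, by omega⟩) hp1) (m.length - 1) le_rfl
  have hp3 := phase3 m _
    (pvInv_mono (fun r c hr hc hq => by omega) hp2) ((m.getD 0 []).length - 1) le_rfl
  exact (hp3.2.2 (m.length - 1) ((m.getD 0 []).length - 1) (by omega) (by omega)
    (Or.inr (Or.inr le_rfl))).1

-- ===== VERDICT (by name: the statement is the Claim_ definition above) =====
theorem max_prod_spec : Claim_equal_max_prod := by
  intro m _ hpre
  unfold Spec_max_prod
  rw [max_prod_eq_best m hpre, max_prod_alt_eq_best m]
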